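-- pv_equiv track=rewrite | github.com/nosebleed-dfg/theory-of-everything | shinies/degree_machine_proof.py | byte_rot
-- ===== SOURCE A (Python) =====
-- def byte_rot(val, q):
--     """Rotate each byte of a 32-bit word by q (mod 256)."""
--     q = round(q)
--     v = 0
--     for bi in range(4):
--         b = (val >> (bi * 8)) & 0xFF
--         b = (b + q) & 0xFF
--         v |= b << (bi * 8)
--     return v
-- ===== SOURCE B (Python) =====
-- def byte_rot(val, q):
--     """Rotate each byte of a 32-bit word by q (mod 256), as one SWAR expression."""
--     q = round(q)
--     qr = (q & 0xFF) * 0x01010101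
--     a = val & 0xFFFFFFFF
--     return ((a & 0x7F7F7F7F) + (qr & 0x7F7F7F7F)) ^ ((a ^ qr) & 0x80808080)
-- ===== Notes on version B (the rewrite author's own statement) =====
-- stated objective: alternative
-- what changed: Replaces A's four-iteration per-byte shift/mask/or loop with a single closed-form SWAR expression that adds q to all four byte lanes at once using carry-suppressed bit-parallel addition ((a&0x7F7F7F7F)+(qr&0x7F7F7F7F))^((a^qr)&0x80808080).
import Mathlib
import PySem

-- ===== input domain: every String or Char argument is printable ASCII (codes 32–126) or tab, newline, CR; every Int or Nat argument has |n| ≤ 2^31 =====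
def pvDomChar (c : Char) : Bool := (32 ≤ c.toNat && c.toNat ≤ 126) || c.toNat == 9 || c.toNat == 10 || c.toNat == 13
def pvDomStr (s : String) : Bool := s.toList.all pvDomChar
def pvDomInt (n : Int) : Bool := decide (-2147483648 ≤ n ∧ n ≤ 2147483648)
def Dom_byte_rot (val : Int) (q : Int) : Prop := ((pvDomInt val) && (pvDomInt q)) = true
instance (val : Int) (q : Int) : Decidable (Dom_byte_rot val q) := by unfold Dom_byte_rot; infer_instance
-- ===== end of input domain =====

-- B replaces A's four-iteration shift/mask/or byte loop by one closed-form SWAR (carry-suppressed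
-- bit-parallel) byte addition over the whole 32-bit word (objective: alternative).

-- ===== PORT A =====
-- Python A: q = round(q) (identity on an int q); then for bi in range(4):
--   b = (val >> (bi*8)) & 0xFF; b = (b + q) & 0xFF; v |= b << (bi*8); return v
def byte_rot (val : Int) (q : Int) : Int :=
  (List.range 4).foldl (fun v bi =>
    let b := PySem.Int.band (val >>> (bi * 8 : Nat)) 255
    let b := PySem.Int.band (b + q) 255
    PySem.Int.bor v (b <<< (bi * 8 : Nat))) 0

-- ===== PORT B =====
-- Python B: q = round(q); qr = (q & 0xFF) * 0x01010101; a = val & 0xFFFFFFFF;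
--   return ((a & 0x7F7F7F7F) + (qr & 0x7F7F7F7F)) ^ ((a ^ qr) & 0x80808080)
def byte_rot_alt (val : Int) (q : Int) : Int :=
  let qr := PySem.Int.band q 0xFF * 0x01010101
  let a := PySem.Int.band val 0xFFFFFFFF
  PySem.Int.bxor (PySem.Int.band a 0x7F7F7F7F + PySem.Int.band qr 0x7F7F7F7F)
    (PySem.Int.band (PySem.Int.bxor a qr) 0x80808080)

-- ===== PRECONDITION & SPEC =====
def Spec_byte_rot (val : Int) (q : Int) (out : Int) : Prop := out = byte_rot_alt val q
instance (val : Int) (q : Int) (out : Int) : Decidable (Spec_byte_rot val q out) := by unfold Spec_byte_rot; infer_instance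

-- ===== CLAIM (what is proved, stated in full; the proofs are below) =====
def Claim_equal_byte_rot : Prop := ∀ (val : Int) (q : Int), Dom_byte_rot val q → Spec_byte_rot val q (byte_rot val q)

-- ===== LEMMAS AND PROOFS =====

theorem natSplitLand {k a b c d : Nat} (ha : a < 2^k) (hc : c < 2^k) :
    (2^k*b + a) &&& (2^k*d + c) = 2^k*(b &&& d) + (a &&& c) := by
  apply Nat.eq_of_testBit_eq
  intro j
  have hac : a &&& c < 2^k := lt_of_le_of_lt Nat.and_le_left ha
  rw [Nat.testBit_land, Nat.testBit_two_pow_mul_add _ ha, Nat.testBit_two_pow_mul_add _ hc,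
      Nat.testBit_two_pow_mul_add _ hac]
  by_cases h : j < k <;> simp [h]
theorem natSplitXor {k a b c d : Nat} (ha : a < 2^k) (hc : c < 2^k) :
    (2^k*b + a) ^^^ (2^k*d + c) = 2^k*(b ^^^ d) + (a ^^^ c) := by
  apply Nat.eq_of_testBit_eq
  intro j
  have hac : a ^^^ c < 2^k := Nat.xor_lt_two_pow ha hc
  rw [Nat.testBit_xor, Nat.testBit_two_pow_mul_add _ ha, Nat.testBit_two_pow_mul_add _ hc,
      Nat.testBit_two_pow_mul_add _ hac]
  by_cases h : j < k <;> simp [h]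

theorem lane1 {x y : Nat} (hx : x < 256) (hy : y < 256) :
    ((x &&& 127) + (y &&& 127)) ^^^ ((x ^^^ y) &&& 128) = (x + y) % 256 := by
  have bits : ∀ a < 2, ∀ b < 2, ∀ c < 2, c ^^^ ((a ^^^ b) &&& 1) = (a + b + c) % 2 := by decide
  have h127 : ∀ z : Nat, z &&& 127 = z % 128 := fun z => Nat.and_two_pow_sub_one_eq_mod z 7
  have hx7 : x % 128 < 2^7 := Nat.mod_lt _ (by norm_num)
  have hy7 : y % 128 < 2^7 := Nat.mod_lt _ (by norm_num)
  have hxe : x = 2^7 * (x / 128) + x % 128 := by omega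
  have hye : y = 2^7 * (y / 128) + y % 128 := by omega
  have hxor : x ^^^ y = 2^7 * (x / 128 ^^^ y / 128) + (x % 128 ^^^ y % 128) := by
    conv_lhs => rw [hxe, hye]
    exact natSplitXor hx7 hy7
  have h128 : (x ^^^ y) &&& 128 = 2^7 * ((x / 128 ^^^ y / 128) &&& 1) := by
    calc (x ^^^ y) &&& 128
        = (2^7 * (x / 128 ^^^ y / 128) + (x % 128 ^^^ y % 128)) &&& (2^7 * 1 + 0) := by
          rw [hxor]; norm_num
      _ = 2^7 * ((x / 128 ^^^ y / 128) &&& 1) + ((x % 128 ^^^ y % 128) &&& 0) :=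
          natSplitLand (Nat.xor_lt_two_pow hx7 hy7) (by norm_num)
      _ = 2^7 * ((x / 128 ^^^ y / 128) &&& 1) := by simp
  have hsum : x % 128 + y % 128 = 2^7 * ((x % 128 + y % 128) / 128) + (x % 128 + y % 128) % 128 := by
    omega
  have htop : (x % 128 + y % 128) ^^^ (2^7 * ((x / 128 ^^^ y / 128) &&& 1)) =
      2^7 * ((x % 128 + y % 128) / 128 ^^^ ((x / 128 ^^^ y / 128) &&& 1)) + (x % 128 + y % 128) % 128 := by
    calc (x % 128 + y % 128) ^^^ (2^7 * ((x / 128 ^^^ y / 128) &&& 1))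
        = (2^7 * ((x % 128 + y % 128) / 128) + (x % 128 + y % 128) % 128)
            ^^^ (2^7 * ((x / 128 ^^^ y / 128) &&& 1) + 0) := by rw [← hsum, Nat.add_zero]
      _ = 2^7 * ((x % 128 + y % 128) / 128 ^^^ ((x / 128 ^^^ y / 128) &&& 1))
            + ((x % 128 + y % 128) % 128 ^^^ 0) :=
          natSplitXor (Nat.mod_lt _ (by norm_num)) (by norm_num)
      _ = _ := by simp
  rw [h127, h127, h128, htop]
  have hb := bits (x / 128) (by omega) (y / 128) (by omega) ((x % 128 + y % 128) / 128) (by omega)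
  rw [hb]
  omega

theorem swar_peel {n1 Q1 M71 M81 b0 q R : Nat} (hb : b0 < 256) (hq : q < 256)
    (hR : ((n1 &&& M71) + (Q1 &&& M71)) ^^^ ((n1 ^^^ Q1) &&& M81) = R) :
    (((2^8*n1 + b0) &&& (2^8*M71 + 127)) + ((2^8*Q1 + q) &&& (2^8*M71 + 127))) ^^^
      (((2^8*n1 + b0) ^^^ (2^8*Q1 + q)) &&& (2^8*M81 + 128)) = 2^8*R + (b0 + q) % 256 := by
  have hb' : b0 < 2^8 := by norm_num at hb ⊢; omega
  have hq' : q < 2^8 := by norm_num; omega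
  have h127 : (127:Nat) < 2^8 := by norm_num
  have h128 : (128:Nat) < 2^8 := by norm_num
  have hlow1 : (b0 &&& 127) + (q &&& 127) < 2^8 := by
    have h1 : b0 &&& 127 ≤ 127 := Nat.and_le_right
    have h2 : q &&& 127 ≤ 127 := Nat.and_le_right
    norm_num; omega
  have hlow2 : (b0 ^^^ q) &&& 128 < 2^8 := by
    have := Nat.and_le_right (n := b0 ^^^ q) (m := 128)
    norm_num; omega
  rw [natSplitLand hb' h127, natSplitLand hq' h127, natSplitXor hb' hq',
      natSplitLand (Nat.xor_lt_two_pow hb' hq') h128]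
  have hsum : (2^8*(n1 &&& M71) + (b0 &&& 127)) + (2^8*(Q1 &&& M71) + (q &&& 127))
      = 2^8*((n1 &&& M71) + (Q1 &&& M71)) + ((b0 &&& 127) + (q &&& 127)) := by ring
  rw [hsum, natSplitXor hlow1 hlow2, hR, lane1 hb hq]

theorem swar4 {n m : Nat} (hn : n < 4294967296) (hm : m < 256) :
    ((n &&& 0x7F7F7F7F) + ((m * 0x01010101) &&& 0x7F7F7F7F)) ^^^
      ((n ^^^ (m * 0x01010101)) &&& 0x80808080)
    = (n % 256 + m) % 256 + 256 * ((n / 256 % 256 + m) % 256)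
      + 65536 * ((n / 65536 % 256 + m) % 256)
      + 16777216 * ((n / 16777216 % 256 + m) % 256) := by
  have hb3 : n / 16777216 < 256 := by omega
  have hR3 := lane1 hb3 hm
  have hR2 := swar_peel (M71 := 127) (M81 := 128)
    (show n / 65536 % 256 < 256 by omega) hm hR3
  rw [show 2^8*(n/16777216) + n/65536%256 = n/65536 from by omega,
      show 2^8*m + m = m*257 from by ring,
      show (2:Nat)^8*127 + 127 = 32639 from by norm_num,
      show (2:Nat)^8*128 + 128 = 32896 from by norm_num] at hR2
  have hR1 := swar_peel (M71 := 32639) (M81 := 32896)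
    (show n / 256 % 256 < 256 by omega) hm hR2
  rw [show 2^8*(n/65536) + n/256%256 = n/256 from by omega,
      show 2^8*(m*257) + m = m*65793 from by ring,
      show (2:Nat)^8*32639 + 127 = 8355711 from by norm_num,
      show (2:Nat)^8*32896 + 128 = 8421504 from by norm_num] at hR1
  have hR0 := swar_peel (M71 := 8355711) (M81 := 8421504)
    (show n % 256 < 256 by omega) hm hR1
  rw [show 2^8*(n/256) + n%256 = n from by omega,
      show 2^8*(m*65793) + m = m*16843009 from by ring,
      show (2:Nat)^8*8355711 + 127 = 2139062143 from by norm_num,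
      show (2:Nat)^8*8421504 + 128 = 2155905152 from by norm_num] at hR0
  rw [hR0]
  omega

theorem natSplitLor {k a b c d : Nat} (ha : a < 2^k) (hc : c < 2^k) :
    (2^k*b + a) ||| (2^k*d + c) = 2^k*(b ||| d) + (a ||| c) := by
  apply Nat.eq_of_testBit_eq
  intro j
  have hac : a ||| c < 2^k := Nat.or_lt_two_pow ha hc
  rw [Nat.testBit_lor, Nat.testBit_two_pow_mul_add _ ha, Nat.testBit_two_pow_mul_add _ hc,
      Nat.testBit_two_pow_mul_add _ hac]
  by_cases h : j < k <;> simp [h]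

theorem band_mask (x : Int) (k : Nat) : PySem.Int.band x (2^k - 1) = x % 2^k := by
  have hKc : (((2:Nat)^k : Nat) : Int) = (2:Int)^k := by push_cast; ring
  have hK1 : 1 ≤ (2:Nat)^k := Nat.one_le_two_pow
  have h2k : (1:Int) ≤ 2^k := by rw [← hKc]; exact_mod_cast hK1
  unfold PySem.Int.band
  split_ifs with h1 h2 h3
  · -- 0 ≤ x
    have ht : ((2:Int)^k - 1).toNat = 2^k - 1 := by omega
    rw [ht, Nat.and_two_pow_sub_one_eq_mod]
    have hc : ((x.toNat % 2^k : Nat) : Int) = (x.toNat : Int) % ((2^k : Nat) : Int) := by push_cast; ring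
    rw [hc, Int.toNat_of_nonneg h1, hKc]
  · omega
  · -- x < 0
    have ht : ((2:Int)^k - 1).toNat = 2^k - 1 := by omega
    rw [ht, Nat.and_comm, Nat.and_two_pow_sub_one_eq_mod]
    set m := (-x - 1).toNat with hm
    have hxm : x = -(m : Int) - 1 := by omega
    set t := m / 2^k with htdef
    set r := m % 2^k with hrdef
    have hmd : 2^k * t + r = m := Nat.div_add_mod m (2^k)
    have hr : r < 2^k := Nat.mod_lt _ (by positivity)
    have hmdZ : (m : Int) = (2:Int)^k * t + r := by rw [← hKc]; exact_mod_cast hmd.symm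
    have h1' : (-(m:Int) - 1) = ((2:Int)^k - 1 - r) + (2:Int)^k * (-(t:Int) - 1) := by
      rw [hmdZ]; ring
    have hrZ : (r : Int) < (2:Int)^k := by rw [← hKc]; exact_mod_cast hr
    rw [hxm, h1', Int.add_mul_emod_self_left, Int.emod_eq_of_lt (by omega) (by omega), ← hKc]
    omega
  · omega

theorem bor_disjoint (a b : Int) (k : Nat) (h0 : 0 ≤ a) (h1 : a < 2^k) (hb : 0 ≤ b) :
    PySem.Int.bor a (b * 2^k) = a + b * 2^k := by
  have hKc : (((2:Nat)^k : Nat) : Int) = (2:Int)^k := by push_cast; ring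
  rw [PySem.Int.bor_of_nonneg h0 (by positivity)]
  have h2 : b * 2^k = ((b.toNat * 2^k : Nat) : Int) := by
    push_cast [Int.toNat_of_nonneg hb]; ring
  rw [h2, Int.toNat_natCast]
  have ha' : a.toNat < 2^k := by omega
  have e1 : a.toNat = 2^k*0 + a.toNat := by ring
  have e2 : b.toNat * 2^k = 2^k*b.toNat + 0 := by ring
  rw [e1, e2, natSplitLor ha' (by positivity)]
  simp only [Nat.or_zero, Nat.zero_or]
  push_cast
  rw [Int.toNat_of_nonneg h0, Int.toNat_of_nonneg hb]
  ring

theorem band255 (x : Int) : PySem.Int.band x 255 = x % 256 := by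
  have := band_mask x 8; norm_num at this ⊢; exact this

theorem main_eq (val q : Int) : byte_rot val q = byte_rot_alt val q := by
  have h256 : (0:Int) < 256 := by norm_num
  -- A side: the loop accumulates the four rotated bytes ORed into disjoint positions
  have hA : byte_rot val q =
      ((val + q) % 256) + ((val / 256 + q) % 256) * 256
      + ((val / 65536 + q) % 256) * 65536 + ((val / 16777216 + q) % 256) * 16777216 := by
    show PySem.Int.bor (PySem.Int.bor (PySem.Int.bor (PySem.Int.bor 0
      (PySem.Int.band (PySem.Int.band (val >>> ((0*8:Nat))) 255 + q) 255 <<< ((0*8:Nat))))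
      (PySem.Int.band (PySem.Int.band (val >>> ((1*8:Nat))) 255 + q) 255 <<< ((1*8:Nat))))
      (PySem.Int.band (PySem.Int.band (val >>> ((2*8:Nat))) 255 + q) 255 <<< ((2*8:Nat))))
      (PySem.Int.band (PySem.Int.band (val >>> ((3*8:Nat))) 255 + q) 255 <<< ((3*8:Nat))) = _
    simp only [Int.shiftRight_eq_div_pow, Int.shiftLeft_eq, band255]
    norm_num
    set c0 := (val + q) % 256 with hc0
    set c1 := (val / 256 + q) % 256 with hc1
    set c2 := (val / 65536 + q) % 256 with hc2
    set c3 := (val / 16777216 + q) % 256 with hc3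
    have b0 : 0 ≤ c0 ∧ c0 < 256 := ⟨Int.emod_nonneg _ (by norm_num), Int.emod_lt_of_pos _ h256⟩
    have b1 : 0 ≤ c1 ∧ c1 < 256 := ⟨Int.emod_nonneg _ (by norm_num), Int.emod_lt_of_pos _ h256⟩
    have b2 : 0 ≤ c2 ∧ c2 < 256 := ⟨Int.emod_nonneg _ (by norm_num), Int.emod_lt_of_pos _ h256⟩
    have b3 : 0 ≤ c3 ∧ c3 < 256 := ⟨Int.emod_nonneg _ (by norm_num), Int.emod_lt_of_pos _ h256⟩
    have hz : PySem.Int.bor 0 c0 = c0 := by rw [PySem.Int.bor_comm, PySem.Int.bor_zero]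
    have e1 := bor_disjoint c0 c1 8 b0.1 (by norm_num; omega) b1.1
    have e2 := bor_disjoint (c0 + c1 * 2^8) c2 16 (by norm_num; omega) (by norm_num; omega) b2.1
    have e3 := bor_disjoint (c0 + c1 * 2^8 + c2 * 2^16) c3 24 (by norm_num; omega) (by norm_num; omega) b3.1
    norm_num at e1 e2 e3
    rw [hz, e1, e2, e3]
  -- B side: reduce to the Nat SWAR expression
  have hv32 : PySem.Int.band val 4294967295 = val % 4294967296 := by
    have := band_mask val 32; norm_num at this ⊢; exact this
  set n : Nat := (val % 4294967296).toNat with hn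
  set m : Nat := (q % 256).toNat with hm
  have hnv : val % 4294967296 = (n : Int) :=
    (Int.toNat_of_nonneg (Int.emod_nonneg _ (by norm_num))).symm
  have hmv : q % 256 = (m : Int) :=
    (Int.toNat_of_nonneg (Int.emod_nonneg _ (by norm_num))).symm
  have hB : byte_rot_alt val q =
      (((((n &&& 0x7F7F7F7F) + ((m * 0x01010101) &&& 0x7F7F7F7F)) ^^^
        ((n ^^^ (m * 0x01010101)) &&& 0x80808080) : Nat)) : Int) := by
    show PySem.Int.bxor
      (PySem.Int.band (PySem.Int.band val 0xFFFFFFFF) 0x7F7F7F7F +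
        PySem.Int.band (PySem.Int.band q 0xFF * 0x01010101) 0x7F7F7F7F)
      (PySem.Int.band (PySem.Int.bxor (PySem.Int.band val 0xFFFFFFFF)
        (PySem.Int.band q 0xFF * 0x01010101)) 0x80808080) = _
    have hq255 : PySem.Int.band q 0xFF = (m : Int) := by
      rw [show (0xFF : Int) = 255 from rfl, band255, hmv]
    rw [show (0xFFFFFFFF : Int) = 4294967295 from rfl, hv32, hnv, hq255]
    have hqr : (m : Int) * 0x01010101 = ((m * 0x01010101 : Nat) : Int) := by push_cast; ring
    rw [hqr]
    rw [show (0x7F7F7F7F : Int) = ((0x7F7F7F7F : Nat) : Int) from by norm_num,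
        show (0x80808080 : Int) = ((0x80808080 : Nat) : Int) from by norm_num,
        PySem.Int.band_natCast, PySem.Int.band_natCast, PySem.Int.bxor_natCast,
        PySem.Int.band_natCast,
        show ∀ (a b : Nat), (a:Int) + (b:Int) = ((a+b : Nat) : Int) from by intro a b; push_cast; ring,
        PySem.Int.bxor_natCast]
  rw [hA, hB, swar4 (show n < 4294967296 by omega) (show m < 256 by omega)]
  push_cast
  omega

-- ===== VERDICT (by name: the statement is the Claim_ definition above) =====
theorem byte_rot_spec : Claim_equal_byte_rot := by
  intro val q _
  exact main_eq val q
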